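-- pv_equiv track=rewrite | github.com/KKaarrooll1337/FUNCTIONS | module_7_6.py | mask_pin
-- ===== SOURCE A (Python) =====
-- def mask_pin(n):
--     masked_n = ""
--
--     for i in range(len(n)):
--         if i in range(2, 12):
--             masked_n += "*"
--         else:
--             masked_n += n[i]
--
--     return masked_n
-- ===== SOURCE B (Python) =====
-- def mask_pin(n):
--     return n[:2] + "*" * max(0, min(len(n), 12) - 2) + n[12:]
-- ===== Notes on version B (the rewrite author's own statement) =====
-- stated objective: simpler
-- what changed: Replaced the per-character index loop (with repeated string concatenation) by a closed-form slice concatenation: kept prefix + computed star count + kept suffix.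
import Mathlib
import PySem

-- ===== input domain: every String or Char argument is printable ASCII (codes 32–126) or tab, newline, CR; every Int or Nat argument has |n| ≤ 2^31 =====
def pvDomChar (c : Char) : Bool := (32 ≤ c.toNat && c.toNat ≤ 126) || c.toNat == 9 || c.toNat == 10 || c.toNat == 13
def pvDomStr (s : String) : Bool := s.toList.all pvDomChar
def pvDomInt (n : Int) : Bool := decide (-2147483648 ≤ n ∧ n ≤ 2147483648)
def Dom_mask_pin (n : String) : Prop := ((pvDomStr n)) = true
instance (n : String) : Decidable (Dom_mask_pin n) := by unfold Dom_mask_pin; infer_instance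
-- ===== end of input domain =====

-- B builds the result in closed form (kept prefix ++ stars ++ kept suffix) instead of A's per-index loop.

-- ===== PORT A =====
def mask_pin (n : String) : String :=
  let cs := n.toList
  String.mk ((PySem.List.pyRange 0 cs.length 1).foldl
    (fun acc i =>
      if 2 ≤ i ∧ i < 12 then acc ++ ['*']
      else acc ++ [PySem.List.pyGetD cs i ' ']) [])

-- ===== PORT B =====
def mask_pin_alt (n : String) : String :=
  let cs := n.toList
  String.mk (cs.take 2 ++ List.replicate (min cs.length 12 - 2) '*' ++ cs.drop 12)

-- ===== PRECONDITION & SPEC =====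
def Spec_mask_pin (n : String) (out : String) : Prop := out = mask_pin_alt n
instance (n : String) (out : String) : Decidable (Spec_mask_pin n out) := by unfold Spec_mask_pin; infer_instance

-- ===== CLAIM (what is proved, stated in full; the proofs are below) =====
def Claim_equal_mask_pin : Prop := ∀ (n : String), Dom_mask_pin n → Spec_mask_pin n (mask_pin n)

-- ===== LEMMAS AND PROOFS =====

theorem mask_pin_core (cs : List Char) :
    (List.range cs.length).map
      (fun k => if 2 ≤ k ∧ k < 12 then '*' else cs.getD k ' ')
    = cs.take 2 ++ List.replicate (min cs.length 12 - 2) '*' ++ cs.drop 12 := by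
  apply List.ext_getElem
  · simp; omega
  · intro k h1 h2
    have hk : k < cs.length := by simpa using h1
    have hAB : (List.take 2 cs ++ List.replicate (min cs.length 12 - 2) '*').length
        = min 2 cs.length + (min cs.length 12 - 2) := by simp
    simp only [List.getElem_map, List.getElem_range, List.getElem_append,
      List.length_take, List.getElem_take, List.getElem_replicate,
      List.getElem_drop, List.getD_eq_getElem?_getD,
      List.getElem?_eq_getElem hk, Option.getD_some]
    split_ifs with hc hx hy hz hw
    all_goals first
      | rfl
      | omega
      | (congr 1 <;> omega)
      | (exfalso; omega)

theorem mask_pin_spec : Claim_equal_mask_pin := by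
  intro n _
  unfold Spec_mask_pin mask_pin mask_pin_alt
  simp only []
  congr 1
  have hfun : (fun (acc : List Char) (i : Int) =>
      if 2 ≤ i ∧ i < 12 then acc ++ ['*'] else acc ++ [PySem.List.pyGetD n.toList i ' '])
      = fun acc i => acc ++ [if 2 ≤ i ∧ i < 12 then '*' else PySem.List.pyGetD n.toList i ' '] := by
    funext acc i; split_ifs <;> rfl
  rw [hfun, PySem.List.foldl_append_singleton_eq_map, List.nil_append,
    PySem.List.pyRange_one]
  have : ((n.toList.length : Int) - 0).toNat = n.toList.length := by omega
  rw [this]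
  rw [List.map_map]
  rw [← mask_pin_core n.toList]
  apply List.map_congr_left
  intro k hk
  simp only [Function.comp, zero_add]
  split_ifs with h1 h2
  · rfl
  · exfalso; omega
  · exfalso; omega
  · simp [PySem.List.pyGetD_natCast]
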